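-- pv_equiv track=rewrite | github.com/Stinger-dev/Programacion | Python/Tema_2/Boletin_3/Ejercicio08.py | vocalesDistintas
-- ===== SOURCE A (Python) =====
-- def vocalesDistintas(cad):
--     tmp = []
--     cad = cad.lower()
--     for n in cad:
--         if n in 'aeiou':
--             if n not in tmp:
--                 tmp.append(n)
--     return len(tmp)
-- ===== SOURCE B (Python) =====
-- def vocalesDistintas(cad):
--     cad = cad.lower()
--     return sum(1 for v in 'aeiou' if v in cad)
-- ===== Notes on version B (the rewrite author's own statement) =====
-- stated objective: simpler
-- what changed: Inverts the traversal: instead of scanning the string and deduplicating vowels into a list, B iterates over the five vowels and counts those occurring as a substring of the lowercased string, so no dedup structure is needed.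
import Mathlib
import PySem

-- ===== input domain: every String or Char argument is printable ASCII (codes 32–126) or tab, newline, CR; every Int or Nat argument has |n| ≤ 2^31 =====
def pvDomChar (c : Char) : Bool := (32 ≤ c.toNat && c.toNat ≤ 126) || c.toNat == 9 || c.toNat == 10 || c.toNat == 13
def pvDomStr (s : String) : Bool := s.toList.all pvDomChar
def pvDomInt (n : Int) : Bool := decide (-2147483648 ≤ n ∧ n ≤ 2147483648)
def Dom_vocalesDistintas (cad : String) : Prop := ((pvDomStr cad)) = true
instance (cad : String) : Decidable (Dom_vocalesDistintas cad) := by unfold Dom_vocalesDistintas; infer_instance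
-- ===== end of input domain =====

-- B inverts the traversal: it loops over the five vowels and counts those occurring in the
-- lowercased string, instead of A's scan over the string with a manual dedup list (objective: simpler).

-- ===== PORT A =====
def vocalesDistintas (cad : String) : Int :=
  let cadL := (PySem.Str.lower cad).toList
  let tmp := cadL.foldl (fun tmp n =>
    if ("aeiou".toList).contains n then
      (if tmp.contains n then tmp else tmp ++ [n])
    else tmp) ([] : List Char)
  (tmp.length : Int)

-- ===== PORT B =====
-- 'v in cad' with a one-character v is the substring test PySem.Str.isIn (String.ofList [v]) cad
def vocalesDistintas_alt (cad : String) : Int :=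
  let cadL := PySem.Str.lower cad
  "aeiou".toList.foldl
    (fun acc v => if PySem.Str.isIn (String.ofList [v]) cadL then acc + 1 else acc) (0 : Int)

-- ===== PRECONDITION & SPEC =====
def Spec_vocalesDistintas (cad : String) (out : Int) : Prop := out = vocalesDistintas_alt cad
instance (cad : String) (out : Int) : Decidable (Spec_vocalesDistintas cad out) := by unfold Spec_vocalesDistintas; infer_instance

-- ===== CLAIM (what is proved, stated in full; the proofs are below) =====
def Claim_equal_vocalesDistintas : Prop := ∀ (cad : String), Dom_vocalesDistintas cad → Spec_vocalesDistintas cad (vocalesDistintas cad)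

-- ===== LEMMAS AND PROOFS =====

-- A's loop body is exactly PySem.Set.add, so tmp = set of the vowel chars of l in first-occurrence order.
theorem pv_tmp_eq_set (l : List Char) :
    l.foldl (fun tmp n =>
      if ("aeiou".toList).contains n then
        (if tmp.contains n then tmp else tmp ++ [n])
      else tmp) ([] : List Char)
      = PySem.Set.ofList (l.filter (fun n => ("aeiou".toList).contains n)) := by
  rw [PySem.List.foldl_if_eq_foldl_filter, PySem.Set.ofList_eq_foldl]
  rfl

-- a single-character substring test is char membership
theorem pv_isIn_singleton (v : Char) (s : String) :
    PySem.Str.isIn (String.ofList [v]) s = s.toList.contains v := by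
  have h : PySem.Str.isIn (String.ofList [v]) s = true ↔ v ∈ s.toList := by
    rw [PySem.Str.isIn_iff_infix]
    constructor
    · intro hi
      exact hi.sublist.mem (by simp)
    · intro hm
      obtain ⟨a, b, hb⟩ := List.append_of_mem hm
      exact ⟨a, b, by simp [hb]⟩
  by_cases hm : v ∈ s.toList <;> simp_all

-- counting loop = countP
theorem pv_foldl_count (q : Char → Bool) (vs : List Char) (acc : Int) :
    vs.foldl (fun acc v => if q v then acc + 1 else acc) acc
      = acc + (vs.countP q : Int) := by
  induction vs generalizing acc with
  | nil => simp
  | cons v vs ih =>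
    by_cases h : q v = true <;> simp [h, ih] <;> omega  -- split on q v

-- the dedup list of vowels found in l has the same length as the vowels-containing count
theorem pv_len_eq (l : List Char) :
    (PySem.Set.ofList (l.filter (fun n => ("aeiou".toList).contains n))).length
      = "aeiou".toList.countP (fun v => l.contains v) := by
  rw [List.countP_eq_length_filter]
  apply List.Perm.length_eq
  apply (List.perm_ext_iff_of_nodup (PySem.Set.nodup_ofList _)
    ((by decide : ("aeiou".toList).Nodup).filter _)).2
  intro x
  simp [PySem.Set.mem_ofList, List.mem_filter, and_comm]

-- ===== VERDICT (by name: the statement is the Claim_ definition above) =====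
theorem vocalesDistintas_spec : Claim_equal_vocalesDistintas := by
  intro cad _
  unfold Spec_vocalesDistintas vocalesDistintas vocalesDistintas_alt
  simp only [pv_tmp_eq_set, pv_len_eq, pv_isIn_singleton, pv_foldl_count, zero_add]
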